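-- pv_equiv track=rewrite | github.com/Satya-anshu/AoC | 2021/Day_14/14.py | extract_info
-- ===== SOURCE A (Python) =====
-- import collections
--
-- def extract_info(lines):
--     found_break = False
--     insert_between_pair = collections.defaultdict()
--     for line in lines:
--         if line == '':
--             found_break=True
--             continue
--         if found_break:
--             key,value = line.split(" -> ")
--             insert_between_pair[key] = value
--         else:
--             template = line
--     return template,insert_between_pair
-- ===== SOURCE B (Python) =====
-- import collections
--
-- def extract_info(lines):
--     try:
--         i = lines.index('')
--     except ValueError:
--         i = len(lines)
--     template = lines[:i][-1]
--     insert_between_pair = collections.defaultdict()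
--     for line in lines[i:]:
--         if line:
--             key, value = line.split(" -> ")
--             insert_between_pair[key] = value
--     return template, insert_between_pair
-- ===== Notes on version B (the rewrite author's own statement) =====
-- stated objective: alternative
-- what changed: A's single loop with a found_break flag is replaced by locating the first blank line with list.index, taking the template as the last element of the prefix slice, and folding the rules dict only over the suffix slice.
import Mathlib
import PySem

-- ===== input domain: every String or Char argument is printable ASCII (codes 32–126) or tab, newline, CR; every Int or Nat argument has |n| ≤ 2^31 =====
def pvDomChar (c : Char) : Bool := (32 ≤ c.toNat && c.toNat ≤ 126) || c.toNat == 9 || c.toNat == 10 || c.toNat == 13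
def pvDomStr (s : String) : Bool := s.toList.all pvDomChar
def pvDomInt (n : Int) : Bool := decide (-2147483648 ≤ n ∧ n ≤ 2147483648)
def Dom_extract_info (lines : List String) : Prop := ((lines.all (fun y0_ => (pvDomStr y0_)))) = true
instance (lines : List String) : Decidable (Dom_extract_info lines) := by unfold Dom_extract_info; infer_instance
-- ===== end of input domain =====

-- B replaces A's one flagged loop by a different decomposition: locate the first blank line by index,
-- take the template from the prefix slice and fold the rules only over the suffix slice (objective: alternative, same cost).

-- ===== PORT A =====
-- state = (found_break, insert_between_pair, template?); template? = none means Python's 'template' is unbound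
def pvAStep (st : Bool × PySem.Dict String String × Option String) (line : String) :
    Bool × PySem.Dict String String × Option String :=
  if line = "" then (true, st.2.1, st.2.2)
  else if st.1 then
    match PySem.Str.split? line " -> " with
    | some [k, v] => (st.1, (st.2.1).insert k v, st.2.2)
    | _ => st      -- Python raises ValueError here (split not into exactly 2 parts); excluded by Pre_
  else (st.1, st.2.1, some line)

def extract_info (lines : List String) : String × (List (String × String)) :=
  let st := lines.foldl pvAStep (false, PySem.Dict.empty, none)
  ((st.2.2).getD "", (st.2.1).items)   -- template = none ⇒ Python raises NameError; excluded by Pre_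

-- ===== PORT B =====
def pvBStep (d : PySem.Dict String String) (line : String) : PySem.Dict String String :=
  if line ≠ "" then
    match PySem.Str.split? line " -> " with
    | some [k, v] => d.insert k v
    | _ => d       -- Python raises ValueError here; excluded by Pre_
  else d

def extract_info_alt (lines : List String) : String × (List (String × String)) :=
  let i : Int := ((PySem.List.index? lines "").getD lines.length : Nat)   -- lines.index('') or len(lines)
  let template := (PySem.List.pyGet? (PySem.List.slice lines (some 0) (some i)) (-1)).getD ""
                   -- lines[:i][-1]; none ⇒ Python raises IndexError; excluded by Pre_
  let d := (PySem.List.slice lines (some i) none).foldl pvBStep PySem.Dict.empty   -- lines[i:]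
  (template, d.items)

-- ===== PRECONDITION & SPEC =====
-- Pre_ excludes exactly the inputs where Python A raises: no non-blank line before the first blank
-- (NameError: 'template' unbound), or a non-blank line after the first blank that " -> " does not
-- split into exactly two parts (ValueError on unpacking).
def Pre_extract_info (lines : List String) : Prop :=
  lines.takeWhile (fun l => l != "") ≠ [] ∧
  ∀ l ∈ lines.dropWhile (fun l => l != ""), l ≠ "" →
    ((PySem.Str.split? l " -> ").getD []).length = 2
instance (lines : List String) : Decidable (Pre_extract_info lines) := by
  unfold Pre_extract_info; infer_instance

def pvWitness_extract_info : List String := ["NNCB", "", "CH -> B", "HH -> N"]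

def Spec_extract_info (lines : List String) (out : String × (List (String × String))) : Prop := out = extract_info_alt lines
instance (lines : List String) (out : String × (List (String × String))) : Decidable (Spec_extract_info lines out) := by unfold Spec_extract_info; infer_instance

-- ===== CLAIM (what is proved, stated in full; the proofs are below) =====
def Claim_equal_extract_info : Prop := ∀ (lines : List String), Dom_extract_info lines → Pre_extract_info lines → Spec_extract_info lines (extract_info lines)

-- ===== LEMMAS AND PROOFS =====

theorem pvPyGet_neg_one (t : List String) : PySem.List.pyGet? t (-1) = t.getLast? := by
  cases t with
  | nil => decide
  | cons x xs => simp [PySem.List.pyGet?, PySem.List.pyIdx?, List.getLast?_eq_getElem?]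

-- A's loop before the break: the flag stays false, the dict is untouched, template becomes the last line
theorem pvFoldA_pre (t : List String) (d : PySem.Dict String String) :
    ∀ (tmp : Option String), (∀ l ∈ t, l ≠ "") →
    t.foldl pvAStep (false, d, tmp) = (false, d, t.getLast?.or tmp) := by
  induction t with
  | nil => intro tmp _; simp
  | cons x xs ih =>
      intro tmp h
      have hx : x ≠ "" := h x (by simp)
      have hxs : ∀ l ∈ xs, l ≠ "" := fun l hl => h l (by simp [hl])
      have hstep : pvAStep (false, d, tmp) x = (false, d, some x) := by
        simp [pvAStep, hx]
      rw [List.foldl_cons, hstep, ih (some x) hxs]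
      have h1 : xs.getLast?.or (some x) = (x :: xs).getLast? := by
        cases xs with
        | nil => simp
        | cons y ys =>
            rw [List.getLast?_cons_cons]
            exact Option.or_of_isSome (by simp)
      have h2 : (x :: xs).getLast?.or tmp = (x :: xs).getLast? :=
        Option.or_of_isSome (by simp)
      rw [h1, h2]

-- A's loop after the break: the flag and template are frozen, the dict evolves exactly by B's step
theorem pvFoldA_post (r : List String) (d : PySem.Dict String String) (tmp : Option String) :
    r.foldl pvAStep (true, d, tmp) = (true, r.foldl pvBStep d, tmp) := by
  induction r generalizing d with
  | nil => rfl
  | cons x xs ih =>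
      by_cases hx : x = ""
      · subst hx; simpa [pvAStep, pvBStep] using ih d
      · simp only [List.foldl_cons, pvAStep, pvBStep, if_neg hx, if_pos hx]
        cases hsp : PySem.Str.split? x " -> " with
        | none => exact ih d
        | some parts =>
            match parts with
            | [] => exact ih d
            | [k] => exact ih d
            | [k, v] => exact ih (d.insert k v)
            | k :: v :: w :: rest => exact ih d

theorem pv_core (lines : List String) : extract_info lines = extract_info_alt lines := by
  by_cases hmem : "" ∈ lines
  · -- there is a blank line: decompose at the first one
    obtain ⟨k, hk⟩ := Option.isSome_iff_exists.mp
      ((PySem.List.index?_isSome_iff lines "").mpr hmem)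
    obtain ⟨pre, suf, hsplit, hlen, hnot⟩ := (PySem.List.index?_eq_some_iff lines "" k).mp hk
    have hpre : ∀ l ∈ pre, l ≠ "" := fun l hl he => hnot (he ▸ hl)
    subst hsplit
    have htake : (pre ++ "" :: suf).take pre.length = pre := by
      simp
    have hdrop : (pre ++ "" :: suf).drop pre.length = "" :: suf := by
      simp
    simp only [extract_info, extract_info_alt, hk, Option.getD_some]
    rw [← hlen]
    rw [PySem.List.slice_zero_start, PySem.List.slice_to_natCast,
        PySem.List.slice_from_natCast, htake, hdrop]
    rw [List.foldl_append, pvFoldA_pre pre _ _ hpre]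
    have hstep : pvAStep (false, PySem.Dict.empty, pre.getLast?.or none) ""
        = (true, PySem.Dict.empty, pre.getLast?.or none) := by
      simp [pvAStep]
    have hbstep : pvBStep PySem.Dict.empty "" = PySem.Dict.empty := by
      simp [pvBStep]
    rw [List.foldl_cons, hstep, pvFoldA_post, List.foldl_cons, hbstep]
    simp [pvPyGet_neg_one]
  · -- no blank line: template is the last line, the mapping stays empty
    have hidx : PySem.List.index? lines "" = none :=
      (PySem.List.index?_eq_none_iff lines "").mpr hmem
    have hall : ∀ l ∈ lines, l ≠ "" := fun l hl he => hmem (he ▸ hl)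
    simp only [extract_info, extract_info_alt, hidx, Option.getD_none]
    rw [PySem.List.slice_zero_start, PySem.List.slice_to_natCast,
        PySem.List.slice_from_natCast, List.take_length, List.drop_length]
    rw [pvFoldA_pre lines _ _ hall]
    simp [pvPyGet_neg_one]

-- ===== VERDICT (by name: the statement is the Claim_ definition above) =====
theorem extract_info_spec : Claim_equal_extract_info := by
  intro lines _ _
  unfold Spec_extract_info
  exact pv_core lines
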